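-- pv_equiv track=rewrite | github.com/conork93/itp-w1-create-box | create_box/main.py | hollow_box
-- ===== SOURCE A (Python) =====
-- def hollow_box(height, width, character):
--     box = ''
--     if height < 0:
--         return ('Invalid Height')
--     elif width < 0:
--         return ('Invalid Width')
--     for i in range(height):
--       for j in range(width):
--         if i == 0 or i == height -1:
--             box += character
--         elif (i != 0 or i != height -1) and (j == 0 or j == width -1):
--             box += character
--         else:
--             box += ' '
--       box += '\n'
--     return box
-- ===== SOURCE B (Python) =====
-- def hollow_box(height, width, character):
--     if height < 0:
--         return 'Invalid Height'
--     elif width < 0: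
--         return 'Invalid Width'
--     rows = []
--     for i in range(height):
--         if i == 0 or i == height - 1:
--             rows.append(character * width)
--         elif width == 1:
--             rows.append(character)
--         elif width == 0:
--             rows.append('')
--         else:
--             rows.append(character + ' ' * (width - 2) + character)
--     return ''.join(r + '\n' for r in rows)
-- ===== Notes on version B (the rewrite author's own statement) =====
-- stated objective: simpler
-- what changed: Replaces A's per-cell nested loop and per-cell branching with whole-row string construction (character*width for edge rows, character + ' '*(width-2) + character for interior rows, special-casing width 0 and 1) joined with newlines.
import Mathlib
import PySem

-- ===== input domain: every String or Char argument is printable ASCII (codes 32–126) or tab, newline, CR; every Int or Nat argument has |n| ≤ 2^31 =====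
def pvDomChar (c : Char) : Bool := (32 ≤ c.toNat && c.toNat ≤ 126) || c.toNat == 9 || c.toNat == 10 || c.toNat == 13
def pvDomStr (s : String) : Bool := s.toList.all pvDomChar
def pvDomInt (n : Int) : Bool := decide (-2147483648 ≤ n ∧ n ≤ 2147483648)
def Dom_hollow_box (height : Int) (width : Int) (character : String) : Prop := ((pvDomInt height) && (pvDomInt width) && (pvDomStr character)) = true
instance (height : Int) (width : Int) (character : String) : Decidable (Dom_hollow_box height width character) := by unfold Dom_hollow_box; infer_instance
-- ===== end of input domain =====

-- B replaces A's per-cell inner loop by whole-row construction (character*width for edge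
-- rows, character + ' '*(width-2) + character for interior rows) joined with '\n': simpler.

-- ===== PORT A =====
-- Strings are ported on the List Char side (String.ofList at the end), as PySem prescribes.
def hollow_box (height : Int) (width : Int) (character : String) : String :=
  if height < 0 then "Invalid Height"
  else if width < 0 then "Invalid Width"
  else
    String.ofList <|
      (PySem.List.pyRange 0 height 1).foldl (fun box i =>
        ((PySem.List.pyRange 0 width 1).foldl (fun b j =>
          if i == 0 || i == height - 1 then b ++ character.toList
          else if (decide (i ≠ 0) || decide (i ≠ height - 1)) &&
                  (j == 0 || j == width - 1) then b ++ character.toList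
          else b ++ [' ']) box) ++ ['\n']) []

-- ===== PORT B =====
def hollow_box_alt (height : Int) (width : Int) (character : String) : String :=
  if height < 0 then "Invalid Height"
  else if width < 0 then "Invalid Width"
  else
    let rows := (PySem.List.pyRange 0 height 1).map (fun i =>
      if i == 0 || i == height - 1 then PySem.List.pyRepeat character.toList width
      else if width == 1 then character.toList
      else if width == 0 then []
      else character.toList ++ PySem.List.pyRepeat [' '] (width - 2) ++ character.toList)
    String.ofList (PySem.Chars.join [] (rows.map (fun r => r ++ ['\n'])))

-- ===== PRECONDITION & SPEC =====
def Spec_hollow_box (height : Int) (width : Int) (character : String) (out : String) : Prop := out = hollow_box_alt height width character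
instance (height : Int) (width : Int) (character : String) (out : String) : Decidable (Spec_hollow_box height width character out) := by unfold Spec_hollow_box; infer_instance

-- ===== CLAIM (what is proved, stated in full; the proofs are below) =====
def Claim_equal_hollow_box : Prop := ∀ (height : Int) (width : Int) (character : String), Dom_hollow_box height width character → Spec_hollow_box height width character (hollow_box height width character)

-- ===== LEMMAS AND PROOFS =====

-- flatMap of a constant over any list is replicate-flatten
theorem pv_flatMap_const {α β : Type} (l : List α) (c : List β) :
    l.flatMap (fun _ => c) = (List.replicate l.length c).flatten := by
  induction l with
  | nil => rfl
  | cons x xs ih => simp [List.flatMap_cons, ih, List.replicate_succ]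

-- join with empty separator is flatten
theorem pv_join_nil (parts : List (List Char)) :
    PySem.Chars.join [] parts = parts.flatten := by
  simp [PySem.Chars.join, List.intercalate]
  induction parts with
  | nil => rfl
  | cons p ps ih => cases ps <;> simp_all [List.intersperse]

-- the per-cell character of A's inner loop
def pvCell (height width : Int) (c : List Char) (i j : Int) : List Char :=
  if i == 0 || i == height - 1 then c
  else if (decide (i ≠ 0) || decide (i ≠ height - 1)) && (j == 0 || j == width - 1) then c
  else [' ']

-- A's row i equals B's row i
theorem pv_row_eq (height width : Int) (c : List Char) (i : Int) (hw : 0 ≤ width) :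
    (PySem.List.pyRange 0 width 1).flatMap (pvCell height width c i) =
      (if i == 0 || i == height - 1 then PySem.List.pyRepeat c width
       else if width == 1 then c
       else if width == 0 then []
       else c ++ PySem.List.pyRepeat [' '] (width - 2) ++ c) := by
  by_cases hedge : (i == 0 || i == height - 1) = true
  · simp only [hedge, if_pos]
    have : (PySem.List.pyRange 0 width 1).flatMap (pvCell height width c i)
        = (PySem.List.pyRange 0 width 1).flatMap (fun _ => c) := by
      apply List.flatMap_congr; intro j _; simp [pvCell, hedge]
    rw [this, pv_flatMap_const, PySem.List.length_pyRange_one, PySem.List.pyRepeat]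
    simp
  · -- interior row: i ≠ 0 and i ≠ height - 1
    have hi0 : i ≠ 0 := by simp at hedge; exact hedge.1
    have hi1 : i ≠ height - 1 := by simp at hedge; exact hedge.2
    have hcell : ∀ j, pvCell height width c i j = if (j == 0 || j == width - 1) then c else [' '] := by
      intro j; simp [pvCell, hi0, hi1, hedge]
    simp only [hedge, if_neg, Bool.false_eq_true, not_false_iff]
    by_cases h1 : width = 1
    · subst h1
      rw [show PySem.List.pyRange 0 1 1 = [0] from PySem.List.pyRange_one_singleton 0]
      simp [hcell]
    · by_cases h0 : width = 0
      · subst h0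
        rw [PySem.List.pyRange_one_eq_nil (by omega)]
        simp
      · -- width ≥ 2
        have hw2 : 2 ≤ width := by omega
        simp only [h1, h0, beq_iff_eq]
        rw [PySem.List.pyRange_one_append 0 (width - 1) width (by omega) (by omega),
            PySem.List.pyRange_one_cons (by omega : (0:Int) < width - 1),
            show PySem.List.pyRange (width - 1) width 1 = [width - 1] by
              have h := PySem.List.pyRange_one_singleton (width - 1)
              rw [show (width - 1) + 1 = width by ring] at h
              exact h]
        simp only [List.flatMap_append, List.flatMap_cons, List.flatMap_nil, List.append_nil]
        rw [hcell 0, hcell (width - 1)]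
        have hmid : (PySem.List.pyRange 1 (width - 1) 1).flatMap (pvCell height width c i)
            = (PySem.List.pyRange 1 (width - 1) 1).flatMap (fun _ => ([' '] : List Char)) := by
          apply List.flatMap_congr; intro j hj
          rw [PySem.List.mem_pyRange_one] at hj
          rw [hcell j]
          have : (j == 0 || j == width - 1) = false := by
            simp only [Bool.or_eq_false_iff, beq_eq_false_iff_ne]; omega
          simp [this]
        rw [zero_add] at *
        rw [hmid, pv_flatMap_const, PySem.List.length_pyRange_one, PySem.List.pyRepeat]
        simp only [beq_self_eq_true, Bool.true_or, Bool.or_true, if_true, if_false]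
        rw [show width - 1 - 1 = width - 2 by ring]

theorem hollow_box_eq_alt (height width : Int) (character : String) :
    hollow_box height width character = hollow_box_alt height width character := by
  unfold hollow_box hollow_box_alt
  by_cases hh : height < 0
  · simp [hh]
  · by_cases hw : width < 0
    · simp [hh, hw]
    · simp only [hh, hw, if_neg, not_false_iff]
      congr 1
      rw [pv_join_nil]
      have hbody : ∀ (box : List Char) (i : Int),
          ((PySem.List.pyRange 0 width 1).foldl (fun b j =>
            if i == 0 || i == height - 1 then b ++ character.toList
            else if (decide (i ≠ 0) || decide (i ≠ height - 1)) && (j == 0 || j == width - 1)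
              then b ++ character.toList
            else b ++ [' ']) box) ++ ['\n']
          = box ++ ((PySem.List.pyRange 0 width 1).flatMap (pvCell height width character.toList i) ++ ['\n']) := by
        intro box i
        have : (PySem.List.pyRange 0 width 1).foldl (fun b j =>
            if i == 0 || i == height - 1 then b ++ character.toList
            else if (decide (i ≠ 0) || decide (i ≠ height - 1)) && (j == 0 || j == width - 1)
              then b ++ character.toList
            else b ++ [' ']) box
            = (PySem.List.pyRange 0 width 1).foldl (fun b j => b ++ pvCell height width character.toList i j) box := by
          apply PySem.List.foldl_congr_mem
          intro b j _; simp only [pvCell]; split_ifs <;> rfl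
        rw [this, PySem.List.foldl_append_eq_flatMap, List.append_assoc]
      calc (PySem.List.pyRange 0 height 1).foldl (fun box i =>
              ((PySem.List.pyRange 0 width 1).foldl (fun b j =>
                if i == 0 || i == height - 1 then b ++ character.toList
                else if (decide (i ≠ 0) || decide (i ≠ height - 1)) && (j == 0 || j == width - 1)
                  then b ++ character.toList
                else b ++ [' ']) box) ++ ['\n']) []
          = (PySem.List.pyRange 0 height 1).foldl (fun box i =>
              box ++ ((PySem.List.pyRange 0 width 1).flatMap (pvCell height width character.toList i) ++ ['\n'])) [] := by
            apply PySem.List.foldl_congr_mem; intro b i _; exact hbody b i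
        _ = (PySem.List.pyRange 0 height 1).flatMap (fun i =>
              (PySem.List.pyRange 0 width 1).flatMap (pvCell height width character.toList i) ++ ['\n']) := by
            rw [PySem.List.foldl_append_eq_flatMap]; rfl
        _ = (((PySem.List.pyRange 0 height 1).map (fun i =>
              if i == 0 || i == height - 1 then PySem.List.pyRepeat character.toList width
              else if width == 1 then character.toList
              else if width == 0 then []
              else character.toList ++ PySem.List.pyRepeat [' '] (width - 2) ++ character.toList)).map
                (fun r => r ++ ['\n'])).flatten := by
            rw [List.map_map, List.flatten_eq_flatMap, List.flatMap_map]
            apply List.flatMap_congr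
            intro i _
            rw [pv_row_eq height width character.toList i (by omega)]
            simp [Function.comp]

-- ===== VERDICT (by name: the statement is the Claim_ definition above) =====
theorem hollow_box_spec : Claim_equal_hollow_box := by
  intro height width character _
  unfold Spec_hollow_box
  exact hollow_box_eq_alt height width character
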